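-- pv_equiv track=rewrite | github.com/thegeeklab/ansible-later | testenv/lib/python2.7/site-packages/ansiblelater/utils/__init__.py | count_spaces
-- ===== SOURCE A (Python) =====
-- def count_spaces(c_string):
--     leading_spaces = 0
--     trailing_spaces = 0
--
--     for i, e in enumerate(c_string):
--         if not e.isspace():
--             break
--         leading_spaces += 1
--
--     for i, e in reversed(list(enumerate(c_string))):
--         if not e.isspace():
--             break
--         trailing_spaces += 1
--
--     return((leading_spaces, trailing_spaces))
-- ===== SOURCE B (Python) =====
-- def count_spaces(c_string):
--     leading = len(c_string) - len(c_string.lstrip())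
--     trailing = len(c_string) - len(c_string.rstrip())
--     return (leading, trailing)
-- ===== Notes on version B (the rewrite author's own statement) =====
-- stated objective: idiomatic
-- what changed: Replaces the two per-character scanning loops (forward and over the reversed enumeration) with length arithmetic on lstrip()/rstrip(): leading = len(s)-len(s.lstrip()), trailing = len(s)-len(s.rstrip()); no loops or breaks remain.
import Mathlib
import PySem

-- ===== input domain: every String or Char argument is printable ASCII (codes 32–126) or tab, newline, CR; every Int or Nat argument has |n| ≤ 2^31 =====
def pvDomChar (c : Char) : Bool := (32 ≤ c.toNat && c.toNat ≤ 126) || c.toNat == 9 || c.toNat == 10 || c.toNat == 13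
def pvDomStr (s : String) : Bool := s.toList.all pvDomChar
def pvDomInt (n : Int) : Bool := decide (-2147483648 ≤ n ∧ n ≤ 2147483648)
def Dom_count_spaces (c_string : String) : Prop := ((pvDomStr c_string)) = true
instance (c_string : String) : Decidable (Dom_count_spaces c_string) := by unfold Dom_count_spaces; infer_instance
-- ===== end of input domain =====

-- B replaces A's two scanning loops with stripped-length arithmetic (idiomatic; same cost).

-- ===== PORT A =====
-- A's scanning loop: count characters while isspace, stop at the first non-space (the 'break').
def pvScanSpaces : List Char → Int
  | [] => 0
  | c :: rest => if !(PySem.Chars.isspace c) then 0 else pvScanSpaces rest + 1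

def count_spaces (c_string : String) : Int × Int :=
  let leading_spaces := pvScanSpaces c_string.toList
  let trailing_spaces := pvScanSpaces c_string.toList.reverse
  (leading_spaces, trailing_spaces)

-- ===== PORT B =====
def count_spaces_alt (c_string : String) : Int × Int :=
  (PySem.Str.len c_string - PySem.Str.len (PySem.Str.lstrip c_string),
   PySem.Str.len c_string - PySem.Str.len (PySem.Str.rstrip c_string))

-- ===== PRECONDITION & SPEC =====
def Spec_count_spaces (c_string : String) (out : Int × Int) : Prop := out = count_spaces_alt c_string
instance (c_string : String) (out : Int × Int) : Decidable (Spec_count_spaces c_string out) := by unfold Spec_count_spaces; infer_instance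

-- ===== CLAIM (what is proved, stated in full; the proofs are below) =====
def Claim_equal_count_spaces : Prop := ∀ (c_string : String), Dom_count_spaces c_string → Spec_count_spaces c_string (count_spaces c_string)

-- ===== LEMMAS AND PROOFS =====
theorem pvScanSpaces_eq (cs : List Char) :
    pvScanSpaces cs = (cs.length : Int) - ((cs.dropWhile PySem.Chars.isspace).length : Int) := by
  induction cs with
  | nil => simp [pvScanSpaces]
  | cons c rest ih =>
    by_cases h : PySem.Chars.isspace c = true
    · have hle := List.length_dropWhile_le (p := PySem.Chars.isspace) (l := rest)
      simp [pvScanSpaces, List.dropWhile, h, ih]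
      omega
    · simp [pvScanSpaces, List.dropWhile, h]

-- ===== VERDICT (by name: the statement is the Claim_ definition above) =====
theorem count_spaces_spec : Claim_equal_count_spaces := by
  intro s _
  unfold Spec_count_spaces count_spaces count_spaces_alt
  simp [pvScanSpaces_eq, PySem.Str.len_eq, PySem.Str.toList_lstrip, PySem.Str.toList_rstrip,
        PySem.Chars.lstrip, PySem.Chars.rstrip]
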